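-- pv_equiv track=rewrite | github.com/elominp/zappy | src/client_ia/elevation.py | check_players_arrived
-- ===== SOURCE A (Python) =====
-- def check_players_arrived(messages, nb_players, id):
--     i = 0
--     while len(messages) > 0:
--         if "message 0,joined " + str(id) == messages[i]:
--             nb_players -= 1
--         elif messages[i] == "message 0,aborted " + str(id):
--             nb_players += 1
--         del messages[i]
--     return nb_players
-- ===== SOURCE B (Python) =====
-- def check_players_arrived(messages, nb_players, id):
--     joined = messages.count("message 0,joined " + str(id))
--     aborted = messages.count("message 0,aborted " + str(id))
--     messages.clear()
--     return nb_players - joined + aborted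
-- ===== Notes on version B (the rewrite author's own statement) =====
-- stated objective: simpler
-- what changed: Replaces A's index-0 deletion loop with per-branch logic by two list.count scans plus an explicit clear(), returning nb_players - joined + aborted in closed form.
import Mathlib
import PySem

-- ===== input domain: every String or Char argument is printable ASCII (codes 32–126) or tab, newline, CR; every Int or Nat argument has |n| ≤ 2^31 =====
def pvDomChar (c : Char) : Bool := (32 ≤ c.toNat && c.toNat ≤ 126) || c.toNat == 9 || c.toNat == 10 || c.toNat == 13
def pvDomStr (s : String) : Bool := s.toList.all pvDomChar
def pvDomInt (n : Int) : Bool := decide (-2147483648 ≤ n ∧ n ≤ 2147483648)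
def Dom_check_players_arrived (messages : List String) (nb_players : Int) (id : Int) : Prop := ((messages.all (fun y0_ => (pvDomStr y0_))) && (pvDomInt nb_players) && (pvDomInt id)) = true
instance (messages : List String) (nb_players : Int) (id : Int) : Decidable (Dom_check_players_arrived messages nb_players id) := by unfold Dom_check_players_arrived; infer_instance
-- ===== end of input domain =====

-- B replaces A's destructive index-0 deletion loop with two count scans plus a clear (simpler);
-- both Pythons empty `messages` in place, and the equivalence proved here is about the return value.

-- ===== PORT A =====
-- A's while loop always inspects messages[i] with i = 0 and deletes it; as structural
-- recursion on the list with nb_players as the loop state.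
def check_players_arrived (messages : List String) (nb_players : Int) (id : Int) : Int :=
  match messages with
  | [] => nb_players
  | m :: rest =>
    if ("message 0,joined " ++ PySem.Int.toStr id) == m then
      check_players_arrived rest (nb_players - 1) id
    else if m == ("message 0,aborted " ++ PySem.Int.toStr id) then
      check_players_arrived rest (nb_players + 1) id
    else
      check_players_arrived rest nb_players id

-- ===== PORT B =====
def check_players_arrived_alt (messages : List String) (nb_players : Int) (id : Int) : Int :=
  let joined := PySem.List.count messages ("message 0,joined " ++ PySem.Int.toStr id)
  let aborted := PySem.List.count messages ("message 0,aborted " ++ PySem.Int.toStr id)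
  nb_players - joined + aborted

-- ===== PRECONDITION & SPEC =====
def Spec_check_players_arrived (messages : List String) (nb_players : Int) (id : Int) (out : Int) : Prop := out = check_players_arrived_alt messages nb_players id
instance (messages : List String) (nb_players : Int) (id : Int) (out : Int) : Decidable (Spec_check_players_arrived messages nb_players id out) := by unfold Spec_check_players_arrived; infer_instance

-- ===== CLAIM (what is proved, stated in full; the proofs are below) =====
def Claim_equal_check_players_arrived : Prop := ∀ (messages : List String) (nb_players : Int) (id : Int), Dom_check_players_arrived messages nb_players id → Spec_check_players_arrived messages nb_players id (check_players_arrived messages nb_players id)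

-- ===== LEMMAS AND PROOFS =====
theorem check_players_arrived_eq (messages : List String) (nb_players : Int) (id : Int) :
    check_players_arrived messages nb_players id
      = nb_players - (messages.count ("message 0,joined " ++ PySem.Int.toStr id) : Int)
        + (messages.count ("message 0,aborted " ++ PySem.Int.toStr id) : Int) := by
  induction messages generalizing nb_players with
  | nil => simp [check_players_arrived]
  | cons m rest ih =>
    have hdiff : ("message 0,joined " ++ PySem.Int.toStr id) ≠ ("message 0,aborted " ++ PySem.Int.toStr id) := by
      intro h; have := congrArg String.toList h
      simp [String.toList_append] at this
    by_cases h1 : ("message 0,joined " ++ PySem.Int.toStr id) = m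
    · subst h1
      simp [check_players_arrived, hdiff, ih]
      ring
    · have h1' : m ≠ "message 0,joined " ++ PySem.Int.toStr id := fun h => h1 h.symm
      by_cases h2 : m = "message 0,aborted " ++ PySem.Int.toStr id
      · simp [check_players_arrived, h2, ih]
        ring
      · simp [check_players_arrived, h1, h1', h2, ih]

-- ===== VERDICT (by name: the statement is the Claim_ definition above) =====
theorem check_players_arrived_spec : Claim_equal_check_players_arrived := by
  intro messages nb_players id _
  unfold Spec_check_players_arrived check_players_arrived_alt
  rw [check_players_arrived_eq, PySem.List.count_eq, PySem.List.count_eq]
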